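-- pv_equiv track=rewrite | github.com/Phunkafizer/RaspyRFM | apps/sensors.py | lfsr_digest16
-- ===== SOURCE A (Python) =====
-- def lfsr_digest16(data, gen, key):
--     sum = 0
--     for b in data:
--         for i in range(7, -1, -1):
--             if (b >> i) & 1 > 0:
--                 sum ^= key
--             key = (key >> 1) ^ (gen if (key & 1) > 0 else 0)
--     return sum
-- ===== SOURCE B (Python) =====
-- def _step(gen, x):
--     # one LFSR advance, applied to x
--     return (x >> 1) ^ (gen if x & 1 else 0)
--
--
-- def lfsr_digest16(data, gen, key):
--     # Horner scheme over the reversed bit sequence, exploiting that the LFSR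
--     # advance is GF(2)-linear: the key is never advanced; instead the
--     # accumulator itself is pushed through the LFSR once per bit, and the
--     # ORIGINAL key is XORed in wherever a data bit is set.
--     acc = 0
--     for b in reversed(data):
--         for i in range(8):  # LSB-first, i.e. reversed bit order
--             acc = _step(gen, acc)
--             if (b >> i) & 1:
--                 acc ^= key
--     return acc
-- ===== Notes on version B (the rewrite author's own statement) =====
-- stated objective: alternative
-- what changed: B replaces A's forward loop (advance the key per bit, XOR the current key-state into the sum at set bits) by the transposed/Horner form that exploits GF(2)-linearity of the LFSR step: the key is never advanced; iterating the REVERSED bit sequence, the accumulator itself is pushed through the LFSR step once per bit and the original key is XORed in at set bits.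
import Mathlib
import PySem

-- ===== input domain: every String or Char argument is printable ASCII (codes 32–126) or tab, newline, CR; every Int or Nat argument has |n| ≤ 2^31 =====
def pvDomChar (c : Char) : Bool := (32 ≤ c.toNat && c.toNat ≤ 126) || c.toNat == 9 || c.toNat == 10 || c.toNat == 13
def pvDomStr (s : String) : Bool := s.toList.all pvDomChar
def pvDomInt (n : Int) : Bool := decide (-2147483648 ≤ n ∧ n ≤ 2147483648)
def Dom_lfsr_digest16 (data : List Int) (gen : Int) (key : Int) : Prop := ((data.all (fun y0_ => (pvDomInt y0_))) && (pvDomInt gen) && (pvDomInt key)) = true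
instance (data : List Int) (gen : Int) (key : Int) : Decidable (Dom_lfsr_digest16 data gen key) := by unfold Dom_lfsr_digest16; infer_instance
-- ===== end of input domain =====

-- B is the transposed (Horner) form of the LFSR digest: the key is never advanced; instead the
-- accumulator is pushed through the GF(2)-linear LFSR step once per bit of the REVERSED bit
-- sequence, XORing in the original key at set bits; objective: alternative algorithm, same cost.

-- ===== PORT A =====
-- literal port of A: one interleaved loop over bytes and bit positions 7..0, state = (sum, key)
def lfsr_digest16 (data : List Int) (gen : Int) (key : Int) : Int :=
  (data.foldl (fun (st : Int × Int) b =>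
    (PySem.List.pyRange 7 (-1) (-1)).foldl (fun (st : Int × Int) i =>
      (if PySem.Int.band (b >>> i.toNat) 1 > 0 then PySem.Int.bxor st.1 st.2 else st.1,
       PySem.Int.bxor (st.2 >>> (1:Nat)) (if PySem.Int.band st.2 1 > 0 then gen else 0))) st)
    (0, key)).1

-- ===== PORT B =====
-- one LFSR advance, applied to x   (Source B's _step)
def pvStep (gen x : Int) : Int :=
  PySem.Int.bxor (x >>> (1:Nat)) (if PySem.Int.band x 1 > 0 then gen else 0)

-- Horner over the reversed bit sequence: key is fixed, the accumulator walks the LFSR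
def lfsr_digest16_alt (data : List Int) (gen : Int) (key : Int) : Int :=
  data.reverse.foldl (fun acc b =>
    (PySem.List.pyRange 0 8 1).foldl (fun acc i =>
      if PySem.Int.band (b >>> i.toNat) 1 > 0 then PySem.Int.bxor (pvStep gen acc) key
      else pvStep gen acc) acc) 0

-- ===== PRECONDITION & SPEC =====
def Spec_lfsr_digest16 (data : List Int) (gen : Int) (key : Int) (out : Int) : Prop := out = lfsr_digest16_alt data gen key
instance (data : List Int) (gen : Int) (key : Int) (out : Int) : Decidable (Spec_lfsr_digest16 data gen key out) := by unfold Spec_lfsr_digest16; infer_instance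

-- ===== CLAIM =====
def Claim_equal_lfsr_digest16 : Prop := ∀ (data : List Int) (gen : Int) (key : Int), Dom_lfsr_digest16 data gen key → Spec_lfsr_digest16 data gen key (lfsr_digest16 data gen key)

-- ===== LEMMAS AND PROOFS =====

-- PySem.Int.bxor is exactly Mathlib's Int.xor
theorem bxor_eq_xor (a b : Int) : PySem.Int.bxor a b = Int.xor a b := by
  cases a <;> cases b <;>
    simp [PySem.Int.bxor, Int.xor, Int.negSucc_eq] <;> omega

theorem nat_xor_shift (m n : Nat) : (m ^^^ n) >>> 1 = (m >>> 1) ^^^ (n >>> 1) := by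
  apply Nat.eq_of_testBit_eq
  intro i
  simp [Nat.testBit_shiftRight, Nat.testBit_xor]

theorem int_xor_shift (x y : Int) :
    (Int.xor x y) >>> (1:Nat) = Int.xor (x >>> (1:Nat)) (y >>> (1:Nat)) := by
  cases x <;> cases y
  · exact congrArg Int.ofNat (nat_xor_shift _ _)
  · exact congrArg Int.negSucc (nat_xor_shift _ _)
  · exact congrArg Int.negSucc (nat_xor_shift _ _)
  · exact congrArg Int.ofNat (nat_xor_shift _ _)

theorem int_xor_assoc (a b c : Int) :
    Int.xor (Int.xor a b) c = Int.xor a (Int.xor b c) := by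
  cases a <;> cases b <;> cases c <;>
    simp [Int.xor, Nat.xor_assoc]

theorem xor_zero' (a : Int) : Int.xor a 0 = a := by
  rw [← bxor_eq_xor]; exact PySem.Int.bxor_zero a

theorem xor_self' (a : Int) : Int.xor a a = 0 := by
  rw [← bxor_eq_xor]; exact PySem.Int.bxor_self a

theorem xor_comm' (a b : Int) : Int.xor a b = Int.xor b a := by
  rw [← bxor_eq_xor, ← bxor_eq_xor]; exact PySem.Int.bxor_comm a b

-- parity of an Int read off its 0-th bit
theorem odd_iff_testBit (x : Int) : PySem.Int.band x 1 > 0 ↔ x.testBit 0 = true := by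
  cases x with
  | ofNat m =>
    simp [PySem.Int.band, Int.testBit, Nat.testBit, Nat.and_one_is_mod]
    try omega
  | negSucc m =>
    simp [PySem.Int.band, Int.testBit, Nat.testBit, Nat.one_and_eq_mod_two]
    try omega

theorem odd_xor (x y : Int) :
    (PySem.Int.band (Int.xor x y) 1 > 0) ↔ ¬ ((PySem.Int.band x 1 > 0) ↔ (PySem.Int.band y 1 > 0)) := by
  rw [odd_iff_testBit, odd_iff_testBit, odd_iff_testBit]
  have h := Int.testBit_lxor x y 0
  rw [h]
  cases hx : x.testBit 0 <;> cases hy : y.testBit 0 <;> simp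

-- the LFSR step is GF(2)-linear
theorem zero_xor' (a : Int) : Int.xor 0 a = a := by
  rw [xor_comm']; exact xor_zero' a

theorem xor_cancel (a b : Int) : Int.xor a (Int.xor a b) = b := by
  rw [← int_xor_assoc, xor_self', zero_xor']

theorem xor_left_comm (a b c : Int) :
    Int.xor a (Int.xor b c) = Int.xor b (Int.xor a c) := by
  rw [← int_xor_assoc, xor_comm' a b, int_xor_assoc]

-- the LFSR step is GF(2)-linear
theorem step_linear (gen x y : Int) :
    pvStep gen (PySem.Int.bxor x y) = PySem.Int.bxor (pvStep gen x) (pvStep gen y) := by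
  unfold pvStep
  simp only [bxor_eq_xor]
  rw [int_xor_shift]
  by_cases hx : PySem.Int.band x 1 > 0 <;> by_cases hy : PySem.Int.band y 1 > 0 <;>
    [ (have h : ¬ PySem.Int.band (Int.xor x y) 1 > 0 := by rw [odd_xor]; tauto);
      (have h : PySem.Int.band (Int.xor x y) 1 > 0 := by rw [odd_xor]; tauto);
      (have h : PySem.Int.band (Int.xor x y) 1 > 0 := by rw [odd_xor]; tauto);
      (have h : ¬ PySem.Int.band (Int.xor x y) 1 > 0 := by rw [odd_xor]; tauto)] <;>
    simp only [hx, hy, h, if_pos, if_neg, not_false_iff] <;>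
    simp [zero_xor', xor_cancel, xor_comm', xor_left_comm]

theorem step_zero (gen : Int) : pvStep gen 0 = 0 := by
  have h : PySem.Int.band 0 1 = 0 := by decide
  simp [pvStep, h]

-- abstract bit-level machinery
def pbit (b i : Int) : Bool := decide (PySem.Int.band (b >>> i.toNat) 1 > 0)

def bitsOf (b : Int) : List Bool :=
  [pbit b 7, pbit b 6, pbit b 5, pbit b 4, pbit b 3, pbit b 2, pbit b 1, pbit b 0]

-- A's loop, flattened to the bit sequence
def fwd (gen : Int) : List Bool → Int × Int → Int × Int
  | [], st => st
  | b :: bs, st => fwd gen bs (if b then PySem.Int.bxor st.1 st.2 else st.1, pvStep gen st.2)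

-- B's fold, as a foldr over the same bit sequence
def hor (gen key : Int) (bits : List Bool) : Int :=
  bits.foldr (fun b a => if b then PySem.Int.bxor (pvStep gen a) key else pvStep gen a) 0

theorem fwd_append (gen : Int) (xs ys : List Bool) (st : Int × Int) :
    fwd gen (xs ++ ys) st = fwd gen ys (fwd gen xs st) := by
  induction xs generalizing st with
  | nil => rfl
  | cons b bs ih => simp [fwd, ih]

theorem foldl_eq_fwd (gen b : Int) : ∀ (is : List Int) (st : Int × Int),
    is.foldl (fun (st : Int × Int) (i : Int) =>
      (if PySem.Int.band (b >>> (i.toNat : Nat)) 1 > 0 then PySem.Int.bxor st.1 st.2 else st.1,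
       PySem.Int.bxor (st.2 >>> (1:Nat)) (if PySem.Int.band st.2 1 > 0 then gen else 0))) st
    = fwd gen (is.map (pbit b)) st := by
  intro is
  induction is with
  | nil => intro st; rfl
  | cons i t ih =>
    intro st
    rw [List.foldl_cons, List.map_cons, ih]
    simp only [fwd]
    congr 1
    simp only [pbit, decide_eq_true_eq, pvStep]

theorem A_flat (gen : Int) (data : List Int) : ∀ (st : Int × Int),
    data.foldl (fun (st : Int × Int) b =>
      (PySem.List.pyRange 7 (-1) (-1)).foldl (fun (st : Int × Int) i =>
        (if PySem.Int.band (b >>> i.toNat) 1 > 0 then PySem.Int.bxor st.1 st.2 else st.1,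
         PySem.Int.bxor (st.2 >>> (1:Nat)) (if PySem.Int.band st.2 1 > 0 then gen else 0))) st)
      st
    = fwd gen (data.flatMap bitsOf) st := by
  induction data with
  | nil => intro st; rfl
  | cons b t ih =>
    intro st
    rw [List.foldl_cons, List.flatMap_cons, fwd_append, ih, foldl_eq_fwd]
    have hm : (PySem.List.pyRange 7 (-1) (-1)).map (pbit b) = bitsOf b := by
      rw [show PySem.List.pyRange 7 (-1) (-1) = [7, 6, 5, 4, 3, 2, 1, 0] from by decide]
      rfl
    rw [hm]

theorem hor_step (gen key : Int) (bits : List Bool) :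
    hor gen (pvStep gen key) bits = pvStep gen (hor gen key bits) := by
  induction bits with
  | nil => simp [hor, step_zero]
  | cons b bs ih =>
    simp only [hor, List.foldr_cons] at *
    by_cases hb : b = true <;> simp [hb, ih, step_linear]

theorem hor_cons (gen key : Int) (b : Bool) (bs : List Bool) :
    hor gen key (b :: bs)
    = if b then PySem.Int.bxor (pvStep gen (hor gen key bs)) key
      else pvStep gen (hor gen key bs) := rfl

theorem fwd_fst (gen : Int) (bits : List Bool) : ∀ (s k : Int),
    (fwd gen bits (s, k)).1 = PySem.Int.bxor s (hor gen k bits) := by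
  induction bits with
  | nil => intro s k; simp [fwd, hor, PySem.Int.bxor_zero]
  | cons b bs ih =>
    intro s k
    simp only [fwd]
    rw [ih, hor_step, hor_cons]
    cases b
    · simp
    · rw [if_pos rfl, if_pos rfl]
      simp only [bxor_eq_xor]
      rw [int_xor_assoc, xor_comm' k]

theorem foldl_eq_bfold (gen key b : Int) : ∀ (is : List Int) (acc : Int),
    is.foldl (fun acc (i : Int) =>
      if PySem.Int.band (b >>> (i.toNat : Nat)) 1 > 0 then PySem.Int.bxor (pvStep gen acc) key
      else pvStep gen acc) acc
    = (is.map (pbit b)).foldl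
        (fun a bb => if bb then PySem.Int.bxor (pvStep gen a) key else pvStep gen a) acc := by
  intro is
  induction is with
  | nil => intro acc; rfl
  | cons i t ih =>
    intro acc
    rw [List.foldl_cons, List.map_cons, List.foldl_cons, ih]
    congr 1
    simp only [pbit, decide_eq_true_eq]

theorem B_hor (gen key : Int) (data : List Int) :
    lfsr_digest16_alt data gen key = hor gen key (data.flatMap bitsOf) := by
  unfold lfsr_digest16_alt
  have hinner : ∀ (b acc : Int),
      (PySem.List.pyRange 0 8 1).foldl (fun acc (i : Int) =>
        if PySem.Int.band (b >>> (i.toNat : Nat)) 1 > 0 then PySem.Int.bxor (pvStep gen acc) key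
        else pvStep gen acc) acc
      = ((bitsOf b).reverse).foldl
          (fun a bb => if bb then PySem.Int.bxor (pvStep gen a) key else pvStep gen a) acc := by
    intro b acc
    rw [foldl_eq_bfold, show PySem.List.pyRange 0 8 1 = [0, 1, 2, 3, 4, 5, 6, 7] from by decide]
    rfl
  simp only [hinner]
  rw [← List.foldl_flatMap]
  have hrev : data.reverse.flatMap (fun b => (bitsOf b).reverse)
      = (data.flatMap bitsOf).reverse := by
    rw [List.reverse_flatMap]; rfl
  rw [hrev, List.foldl_reverse]
  rfl

-- ===== VERDICT =====
theorem lfsr_digest16_spec : Claim_equal_lfsr_digest16 := by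
  intro data gen key _
  unfold Spec_lfsr_digest16 lfsr_digest16
  rw [A_flat, fwd_fst, B_hor, PySem.Int.bxor_comm, PySem.Int.bxor_zero]
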